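-- pv_equiv track=rewrite | github.com/PROFESSIONAL-ELECTIVE-2/Car-Rental-Management | backend/urgency_service.py | build_urgency_report
-- ===== SOURCE A (Python) =====
-- def build_urgency_report(messages: list[dict]) -> dict:
--     """
--     Summarise urgency distribution across a list of message dicts.
--     Each dict must have 'urgency' (str|None) and 'status' (str) keys.
--     """
--     report = {'total': 0, 'high': 0, 'medium': 0, 'low': 0,
--               'unclassified': 0, 'highUnread': 0}
--     for msg in messages:
--         report['total'] += 1
--         urg = msg.get('urgency') or 'unclassified'
--         if urg in report:
--             report[urg] += 1
--         else:
--             report['unclassified'] += 1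
--         if urg == 'high' and msg.get('status') == 'Unread':
--             report['highUnread'] += 1
--     return report
-- ===== SOURCE B (Python) =====
-- def build_urgency_report(messages: list[dict]) -> dict:
--     """Table-build then assemble: frequency table of normalized urgencies,
--     folded into the fixed report keys, plus a separate filtered pass for highUnread."""
--     freq = {}
--     for m in messages:
--         k = m.get('urgency') or 'unclassified'
--         freq[k] = freq.get(k, 0) + 1
--     report = {'total': len(messages), 'high': 0, 'medium': 0, 'low': 0,
--               'unclassified': 0, 'highUnread': 0}
--     for key, cnt in freq.items():
--         if key in report:
--             report[key] += cnt
--         else: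
--             report['unclassified'] += cnt
--     report['highUnread'] += sum(
--         1 for m in messages
--         if (m.get('urgency') or 'unclassified') == 'high'
--         and m.get('status') == 'Unread')
--     return report
-- ===== Notes on version B (the rewrite author's own statement) =====
-- stated objective: idiomatic
-- what changed: Replaces the single incremental per-message pass with a frequency-table build over normalized urgencies, a separate assembly fold of that table into the fixed report keys, and an independent filtered pass for highUnread.
import Mathlib
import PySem

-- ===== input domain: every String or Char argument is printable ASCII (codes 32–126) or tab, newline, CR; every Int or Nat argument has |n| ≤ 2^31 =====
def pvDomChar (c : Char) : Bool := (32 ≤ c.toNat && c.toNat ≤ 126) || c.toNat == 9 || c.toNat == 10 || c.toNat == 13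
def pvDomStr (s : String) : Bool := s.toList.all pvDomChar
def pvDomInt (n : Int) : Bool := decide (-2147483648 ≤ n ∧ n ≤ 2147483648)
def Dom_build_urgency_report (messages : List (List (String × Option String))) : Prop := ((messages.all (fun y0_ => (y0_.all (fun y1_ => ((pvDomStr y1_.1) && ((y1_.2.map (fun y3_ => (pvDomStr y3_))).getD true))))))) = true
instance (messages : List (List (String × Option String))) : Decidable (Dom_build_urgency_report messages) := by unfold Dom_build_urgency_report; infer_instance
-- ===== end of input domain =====

-- B builds a frequency table of normalized urgencies and assembles the report from it,
-- with a separate filtered pass for highUnread, instead of A's single incremental pass (objective: idiomatic).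


-- ===== PORT A =====
-- msg.get(k) on the message dict
def pvMsgGet (msg : List (String × Option String)) (k : String) : Option (Option String) :=
  (PySem.Dict.ofList msg).get? k

def build_urgency_report (messages : List (List (String × Option String))) : List (String × Int) :=
  let report0 : PySem.Dict String Int :=
    PySem.Dict.mk [("total", 0), ("high", 0), ("medium", 0), ("low", 0),
                   ("unclassified", 0), ("highUnread", 0)]
  let final := messages.foldl (fun report msg =>
    let report := report.insert "total" (report.getD "total" 0 + 1)
    -- urg = msg.get('urgency') or 'unclassified'  (None and '' are falsy)
    let urg : String := match pvMsgGet msg "urgency" with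
      | some (some s) => if s = "" then "unclassified" else s
      | _ => "unclassified"
    let report := if report.contains urg then report.insert urg (report.getD urg 0 + 1)
                  else report.insert "unclassified" (report.getD "unclassified" 0 + 1)
    if urg = "high" ∧ pvMsgGet msg "status" = some (some "Unread")
    then report.insert "highUnread" (report.getD "highUnread" 0 + 1)
    else report) report0
  final.items

-- ===== PORT B =====
-- normalized urgency of a message: m.get('urgency') or 'unclassified'
def pvNorm (msg : List (String × Option String)) : String :=
  -- m.get('urgency') or 'unclassified' (a missing key, None and '' are all falsy)
  let u : String := (((PySem.Dict.ofList msg).get? "urgency").join).getD ""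
  if u = "" then "unclassified" else u

def build_urgency_report_alt (messages : List (List (String × Option String))) : List (String × Int) :=
  -- freq[k] = freq.get(k, 0) + 1 over normalized urgencies
  let freq : PySem.Dict String Int :=
    (messages.map pvNorm).foldl (fun d k => d.insert k (d.getD k 0 + 1)) PySem.Dict.empty
  let report0 : PySem.Dict String Int :=
    PySem.Dict.mk [("total", (messages.length : Int)), ("high", 0), ("medium", 0), ("low", 0),
                   ("unclassified", 0), ("highUnread", 0)]
  let report := freq.items.foldl (fun r kv =>
    if r.contains kv.1 then r.insert kv.1 (r.getD kv.1 0 + kv.2)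
    else r.insert "unclassified" (r.getD "unclassified" 0 + kv.2)) report0
  let hu : Int := (messages.filter (fun m =>
    pvNorm m = "high" ∧ (PySem.Dict.ofList m).get? "status" = some (some "Unread"))).length
  (report.insert "highUnread" (report.getD "highUnread" 0 + hu)).items

-- ===== PRECONDITION & SPEC =====
def Spec_build_urgency_report (messages : List (List (String × Option String))) (out : List (String × Int)) : Prop := out = build_urgency_report_alt messages
instance (messages : List (List (String × Option String))) (out : List (String × Int)) : Decidable (Spec_build_urgency_report messages out) := by unfold Spec_build_urgency_report; infer_instance

-- ===== CLAIM (what is proved, stated in full; the proofs are below) =====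
def Claim_equal_build_urgency_report : Prop := ∀ (messages : List (List (String × Option String))), Dom_build_urgency_report messages → Spec_build_urgency_report messages (build_urgency_report messages)

-- ===== LEMMAS AND PROOFS =====

-- the fixed-key report dict, as a function of its six values
def pvMk6 (a b c d e f : Int) : PySem.Dict String Int :=
  PySem.Dict.mk [("total",a),("high",b),("medium",c),("low",d),("unclassified",e),("highUnread",f)]

-- loop body of A (abstracted over the normalized urgency and the status condition)
def pvBodyAbs (report : PySem.Dict String Int) (urg : String) (C : Prop) [Decidable C] :
    PySem.Dict String Int :=
  let report := report.insert "total" (report.getD "total" 0 + 1)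
  let report := if report.contains urg then report.insert urg (report.getD urg 0 + 1)
                else report.insert "unclassified" (report.getD "unclassified" 0 + 1)
  if urg = "high" ∧ C then report.insert "highUnread" (report.getD "highUnread" 0 + 1)
  else report

-- loop body of B's assembly fold
def pvBodyB (r : PySem.Dict String Int) (kv : String × Int) : PySem.Dict String Int :=
  if r.contains kv.1 then r.insert kv.1 (r.getD kv.1 0 + kv.2)
  else r.insert "unclassified" (r.getD "unclassified" 0 + kv.2)

def pvOtherB (k : String) : Bool :=
  !(k == "total" || k == "high" || k == "medium" || k == "low" || k == "highUnread")

def pvCnt (msgs : List (List (String × Option String))) (k : String) : Int :=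
  ((msgs.map pvNorm).count k : Nat)

def pvCntU (msgs : List (List (String × Option String))) : Int :=
  (msgs.countP (fun m => pvOtherB (pvNorm m)) : Nat)

def pvCntHU (msgs : List (List (String × Option String))) : Int :=
  (msgs.countP (fun m => decide (pvNorm m = "high" ∧ ((PySem.Dict.ofList m).get? "status" = some (some "Unread")))) : Nat)

theorem pvStepA (a b c d e f : Int) (n : String) (C : Prop) [Decidable C] :
    pvBodyAbs (pvMk6 a b c d e f) n C =
    pvMk6 (a + 1 + (if n = "total" then 1 else 0)) (b + (if n = "high" then 1 else 0))
      (c + (if n = "medium" then 1 else 0)) (d + (if n = "low" then 1 else 0))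
      (e + (if pvOtherB n then 1 else 0))
      (f + (if n = "highUnread" then 1 else 0) + (if n = "high" ∧ C then 1 else 0)) := by
  by_cases h1 : n = "total" <;> by_cases h2 : n = "high" <;> by_cases h3 : n = "medium" <;>
    by_cases h4 : n = "low" <;> by_cases h5 : n = "unclassified" <;> by_cases h6 : n = "highUnread" <;>
    (have H1 : ("total":String) = n ↔ n = "total" := eq_comm
     have H2 : ("high":String) = n ↔ n = "high" := eq_comm
     have H3 : ("medium":String) = n ↔ n = "medium" := eq_comm
     have H4 : ("low":String) = n ↔ n = "low" := eq_comm
     have H5 : ("unclassified":String) = n ↔ n = "unclassified" := eq_comm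
     have H6 : ("highUnread":String) = n ↔ n = "highUnread" := eq_comm
     simp_all [pvBodyAbs, pvMk6, pvOtherB, PySem.Dict.insert, PySem.Dict.getD, PySem.Dict.get?,
       PySem.Dict.contains] <;> split_ifs <;> simp_all)

theorem pvStepB (a b c d e f v : Int) (k : String) :
    pvBodyB (pvMk6 a b c d e f) (k, v) =
    pvMk6 (a + (if k = "total" then v else 0)) (b + (if k = "high" then v else 0))
      (c + (if k = "medium" then v else 0)) (d + (if k = "low" then v else 0))
      (e + (if pvOtherB k then v else 0))
      (f + (if k = "highUnread" then v else 0)) := by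
  by_cases h1 : k = "total" <;> by_cases h2 : k = "high" <;> by_cases h3 : k = "medium" <;>
    by_cases h4 : k = "low" <;> by_cases h5 : k = "unclassified" <;> by_cases h6 : k = "highUnread" <;>
    (have H1 : ("total":String) = k ↔ k = "total" := eq_comm
     have H2 : ("high":String) = k ↔ k = "high" := eq_comm
     have H3 : ("medium":String) = k ↔ k = "medium" := eq_comm
     have H4 : ("low":String) = k ↔ k = "low" := eq_comm
     have H5 : ("unclassified":String) = k ↔ k = "unclassified" := eq_comm
     have H6 : ("highUnread":String) = k ↔ k = "highUnread" := eq_comm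
     simp_all [pvBodyB, pvMk6, pvOtherB, PySem.Dict.insert, PySem.Dict.getD, PySem.Dict.get?,
       PySem.Dict.contains])

-- closed form of A's loop from an arbitrary six-value report
theorem pvFoldA (msgs : List (List (String × Option String))) :
    ∀ a b c d e f : Int,
    msgs.foldl (fun report msg => pvBodyAbs report (pvNorm msg) (((PySem.Dict.ofList msg).get? "status" = some (some "Unread")))) (pvMk6 a b c d e f) =
    pvMk6 (a + msgs.length + pvCnt msgs "total") (b + pvCnt msgs "high")
      (c + pvCnt msgs "medium") (d + pvCnt msgs "low") (e + pvCntU msgs)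
      (f + pvCnt msgs "highUnread" + pvCntHU msgs) := by
  induction msgs with
  | nil => intro a b c d e f; simp [pvCnt, pvCntU, pvCntHU]
  | cons m t ih =>
    intro a b c d e f
    simp only [List.foldl_cons]
    rw [pvStepA, ih]
    simp only [pvMk6, pvCnt, pvCntU, pvCntHU, List.map_cons, List.count_cons, List.countP_cons,
      List.length_cons, PySem.Dict.mk.injEq, List.cons.injEq, Prod.mk.injEq, and_true, true_and]
    push_cast
    refine ⟨?_, ?_, ?_, ?_, ?_, ?_⟩ <;> split_ifs <;> (try simp_all) <;> omega

-- closed form of B's assembly fold over an arbitrary items list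
theorem pvFoldB (L : List (String × Int)) :
    ∀ a b c d e f : Int,
    L.foldl pvBodyB (pvMk6 a b c d e f) =
    pvMk6 (a + ((L.filter (fun p => p.1 == "total")).map (·.2)).sum)
      (b + ((L.filter (fun p => p.1 == "high")).map (·.2)).sum)
      (c + ((L.filter (fun p => p.1 == "medium")).map (·.2)).sum)
      (d + ((L.filter (fun p => p.1 == "low")).map (·.2)).sum)
      (e + ((L.filter (fun p => pvOtherB p.1)).map (·.2)).sum)
      (f + ((L.filter (fun p => p.1 == "highUnread")).map (·.2)).sum) := by
  induction L with
  | nil => intro a b c d e f; simp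
  | cons p t ih =>
    intro a b c d e f
    obtain ⟨k, v⟩ := p
    simp only [List.foldl_cons]
    rw [pvStepB, ih]
    simp only [pvMk6, List.filter_cons, PySem.Dict.mk.injEq, List.cons.injEq, Prod.mk.injEq,
      and_true, true_and]
    refine ⟨?_, ?_, ?_, ?_, ?_, ?_⟩ <;> split_ifs <;> (try simp_all) <;> omega

-- sum of counter values over the keys satisfying p = countP of the underlying list
theorem pvSumCounter (ns : List String) (p : String → Bool) :
    ((((PySem.Set.ofList ns).filter p).map (fun x => (ns.count x : Int)))).sum =
    (ns.countP p : Nat) := by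
  have hperm : (PySem.Set.ofList ns).Perm ns.dedup := by
    rw [List.perm_ext_iff_of_nodup (PySem.Set.nodup_ofList ns) ns.nodup_dedup]
    intro x; rw [PySem.Set.mem_ofList, List.mem_dedup]
  have h2 := List.sum_map_count_dedup_filter_eq_countP p ns
  calc ((((PySem.Set.ofList ns).filter p).map (fun x => (ns.count x : Int)))).sum
      = (((ns.dedup.filter p).map (fun x => (ns.count x : Int)))).sum :=
        ((hperm.filter p).map _).sum_eq
    _ = (((ns.dedup.filter p).map ns.count).sum : Nat) := by
        rw [Nat.cast_list_sum, List.map_map]; rfl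
    _ = (ns.countP p : Nat) := by rw [h2]

theorem pvGetDHU (a b c d e f : Int) :
    (pvMk6 a b c d e f).getD "highUnread" 0 = f := by
  simp [pvMk6, PySem.Dict.getD, PySem.Dict.get?]

theorem pvInsertHU (a b c d e f v : Int) :
    (pvMk6 a b c d e f).insert "highUnread" v = pvMk6 a b c d e v := by
  simp [pvMk6, PySem.Dict.insert, PySem.Dict.contains]

-- sum of a key's column of the counter items = count of that key
theorem pvColumn (ns : List String) (p : String → Bool) :
    ((((PySem.Set.ofList ns).map (fun k => (k, (ns.count k : Int)))).filter
        (fun q => p q.1)).map (·.2)).sum = (ns.countP p : Nat) := by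
  rw [List.filter_map, List.map_map]
  have : ((PySem.Set.ofList ns).filter ((fun q : String × Int => p q.1) ∘
      (fun k => (k, (ns.count k : Int))))) = (PySem.Set.ofList ns).filter p := rfl
  rw [this]
  exact pvSumCounter ns p

-- ===== VERDICT (by name: the statement is the Claim_ definition above) =====
theorem build_urgency_report_spec : Claim_equal_build_urgency_report := by
  intro msgs _
  unfold Spec_build_urgency_report
  have hx : ∀ msg : List (String × Option String),
      (match pvMsgGet msg "urgency" with
        | some (some s) => if s = "" then "unclassified" else s
        | _ => "unclassified") = pvNorm msg := by
    intro msg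
    unfold pvNorm pvMsgGet
    cases h : (PySem.Dict.ofList msg).get? "urgency" with
    | none => rfl
    | some o => cases o with
      | none => rfl
      | some t => by_cases hs : t = "" <;> simp [hs, Option.join]
  have hA : build_urgency_report msgs =
      (msgs.foldl (fun report msg => pvBodyAbs report (pvNorm msg) (((PySem.Dict.ofList msg).get? "status" = some (some "Unread"))))
        (pvMk6 0 0 0 0 0 0)).items := by
    show (msgs.foldl (fun (report : PySem.Dict String Int) msg =>
        pvBodyAbs report (match pvMsgGet msg "urgency" with
          | some (some s) => if s = "" then "unclassified" else s
          | _ => "unclassified") (((PySem.Dict.ofList msg).get? "status" = some (some "Unread"))))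
        (pvMk6 0 0 0 0 0 0)).items = _
    congr 1
    apply PySem.List.foldl_congr_mem
    intro acc m _
    rw [hx]
  have hfreq : (msgs.map pvNorm).foldl (fun d k => d.insert k (d.getD k 0 + 1)) PySem.Dict.empty
      = PySem.Dict.counter (msgs.map pvNorm) :=
    PySem.Dict.foldl_insert_getD_add_one_eq_counter (msgs.map pvNorm)
  have hB : build_urgency_report_alt msgs =
      ((((PySem.Dict.counter (msgs.map pvNorm)).items.foldl pvBodyB
          (pvMk6 (msgs.length : Int) 0 0 0 0 0))).insert "highUnread"
        (((PySem.Dict.counter (msgs.map pvNorm)).items.foldl pvBodyB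
          (pvMk6 (msgs.length : Int) 0 0 0 0 0)).getD "highUnread" 0 + pvCntHU msgs)).items := by
    show ((((msgs.map pvNorm).foldl (fun d k => d.insert k (d.getD k 0 + 1))
        PySem.Dict.empty).items.foldl pvBodyB _).insert "highUnread" _).items = _
    rw [hfreq]
    have hlen : ((msgs.filter (fun m =>
        decide (pvNorm m = "high" ∧ (PySem.Dict.ofList m).get? "status" = some (some "Unread")))).length : Int)
        = pvCntHU msgs := by
      simp [pvCntHU, List.countP_eq_length_filter]
    rw [hlen]
    rfl
  rw [hA, hB, pvFoldA, PySem.Dict.items_counter, pvFoldB]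
  rw [pvColumn _ (fun x => x == "total"), pvColumn _ (fun x => x == "high"),
    pvColumn _ (fun x => x == "medium"), pvColumn _ (fun x => x == "low"),
    pvColumn _ pvOtherB, pvColumn _ (fun x => x == "highUnread"), pvGetDHU, pvInsertHU]
  have hcnt : ∀ k : String, ((msgs.map pvNorm).countP (fun x => x == k) : Int)
      = pvCnt msgs k := by
    intro k; simp [pvCnt, List.count]
  have hU : ((msgs.map pvNorm).countP pvOtherB : Int) = pvCntU msgs := by
    simp [pvCntU, List.countP_map]; rfl
  rw [hcnt, hcnt, hcnt, hcnt, hcnt, hU]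
  simp [pvMk6]
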